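-- pv_equiv track=rewrite | github.com/vanessasun64/USOS_shared | Merge_scripts/icartt_read_and_merge/ict_utils.py | char_cleaner
-- ===== SOURCE A (Python) =====
-- def char_cleaner(mystring, ignore: list = [], replace_with: str ='_'):
--     """Clean up gross strings from weird characters."""
--     after = mystring.strip()  # strip all leading/trailing whitespace
--
--     # Then, replace common representations with a word.
--     after = after.replace('%', 'percent')
--     after = after.replace('_+_', '+')
--     after = after.replace('-->', '_to_')
--     after = after.replace('->', '_to_')
--
--     # A list of bad chars we don't want in our string.
--     bad_chars = [' ', ',', '.', '"', '*', '!', '@', '#', '$', '^', '&',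
--                   '=', '?', '/', '\\', ':', ';', '~', '`', '<',
--                  '>', '{', '}']
--
--     for i in range(0, len(bad_chars)):
--         if bad_chars[i] not in ignore:  # don't replace chars they want
--             after = after.replace(bad_chars[i], replace_with)
--
--     after = after.replace('_to_', '->')
--
--
--     return after
-- ===== SOURCE B (Python) =====
-- BAD_CHARS = set(' ,."*!@#$^&=?/\\:;~`<>{}')
--
--
-- def char_cleaner(mystring, ignore: list = [], replace_with: str = '_'):
--     """Clean up gross strings from weird characters (single-pass version)."""
--     after = mystring.strip()
--
--     after = after.replace('%', 'percent')
--     after = after.replace('_+_', '+')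
--     after = after.replace('-->', '_to_')
--     after = after.replace('->', '_to_')
--
--     bad = BAD_CHARS.difference(ignore)
--     after = ''.join(replace_with if c in bad else c for c in after)
--
--     return after.replace('_to_', '->')
-- ===== Notes on version B (the rewrite author's own statement) =====
-- stated objective: faster
-- what changed: A's loop of 23 sequential whole-string str.replace scans (each probing the ignore argument by a list scan) is replaced by one set of the bad characters not in ignore and a single join pass over the string; the strip, the ordered multi-character replaces and the final round-trip replace are unchanged. …
-- outside the precondition, e.g. on char_cleaner('a b', [], '.x'): A returns 'a.xxb', B returns 'a.xb'
import Mathlib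
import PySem

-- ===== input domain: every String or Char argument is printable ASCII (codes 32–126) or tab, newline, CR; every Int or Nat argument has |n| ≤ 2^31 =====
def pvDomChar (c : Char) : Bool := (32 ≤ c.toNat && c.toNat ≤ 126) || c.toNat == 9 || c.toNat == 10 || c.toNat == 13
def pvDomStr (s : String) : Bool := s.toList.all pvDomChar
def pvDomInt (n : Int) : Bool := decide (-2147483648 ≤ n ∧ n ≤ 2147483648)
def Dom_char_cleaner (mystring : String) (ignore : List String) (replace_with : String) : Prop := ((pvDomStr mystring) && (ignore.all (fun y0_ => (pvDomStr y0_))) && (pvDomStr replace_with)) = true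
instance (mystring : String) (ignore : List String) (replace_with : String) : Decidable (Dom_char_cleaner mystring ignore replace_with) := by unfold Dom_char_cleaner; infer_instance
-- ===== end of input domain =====

-- B replaces A's 23 sequential whole-string scans by one set of the bad characters
-- not in `ignore` and a single pass over the string (objective: faster, one pass).

-- ===== PORT A =====
def pvBadChars : List String :=
  [" ", ",", ".", "\"", "*", "!", "@", "#", "$", "^", "&",
   "=", "?", "/", "\\", ":", ";", "~", "`", "<",
   ">", "{", "}"]

def char_cleaner (mystring : String) (ignore : List String) (replace_with : String) : String :=
  let after0 := PySem.Str.strip mystring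
  let after1 := PySem.Str.replace after0 "%" "percent"
  let after2 := PySem.Str.replace after1 "_+_" "+"
  let after3 := PySem.Str.replace after2 "-->" "_to_"
  let after4 := PySem.Str.replace after3 "->" "_to_"
  let after5 := (PySem.List.pyRange 0 (PySem.List.len pvBadChars)).foldl
    (fun a i =>
      if PySem.List.pyGetD pvBadChars i "" ∉ ignore then
        PySem.Str.replace a (PySem.List.pyGetD pvBadChars i "") replace_with
      else a) after4
  PySem.Str.replace after5 "_to_" "->"

-- ===== PORT B =====
-- Source B's BAD_CHARS is a set of single characters; here as its list of distinct chars.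
def pvBadCharsC : List Char :=
  [' ', ',', '.', '"', '*', '!', '@', '#', '$', '^', '&',
   '=', '?', '/', '\\', ':', ';', '~', '`', '<',
   '>', '{', '}']

def char_cleaner_alt (mystring : String) (ignore : List String) (replace_with : String) : String :=
  let after0 := PySem.Str.strip mystring
  let after1 := PySem.Str.replace after0 "%" "percent"
  let after2 := PySem.Str.replace after1 "_+_" "+"
  let after3 := PySem.Str.replace after2 "-->" "_to_"
  let after4 := PySem.Str.replace after3 "->" "_to_"
  -- bad = BAD_CHARS.difference(ignore)
  let bad : List Char := pvBadCharsC.filter (fun c => String.ofList [c] ∉ ignore)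
  -- ''.join(replace_with if c in bad else c for c in after)
  let after5 := String.ofList
    (after4.toList.flatMap (fun c => if c ∈ bad then replace_with.toList else [c]))
  PySem.Str.replace after5 "_to_" "->"

-- ===== PRECONDITION & SPEC =====
-- bad char b occurs in w (not ignored) and w is not just that character itself
def pvHarmC (ignore : List String) (w : List Char) (b : Char) : Bool :=
  w.contains b && !(ignore.contains (String.ofList [b])) && !(w == [b])

def pvScanOK (mystring : String) (ignore : List String) (replace_with : String) : List Char → Bool
  | [] => true
  | c :: cs =>
      (!(mystring.toList.contains c && !(ignore.contains (String.ofList [c]))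
          && cs.any (pvHarmC ignore replace_with.toList)))
        && pvScanOK mystring ignore replace_with cs

-- Pre_ excludes only the inputs where some non-ignored bad character of mystring
-- precedes, in the fixed bad-character list, a non-ignored bad character occurring
-- inside replace_with (other than replace_with being exactly that character):
-- there it is an under-specified corner whether the inserted replacement text is
-- itself cleaned by the later replaces (A) or inserted verbatim (B), and either
-- choice is defensible.
def Pre_char_cleaner (mystring : String) (ignore : List String) (replace_with : String) : Prop :=
  pvScanOK mystring ignore replace_with pvBadCharsC = true
instance (mystring : String) (ignore : List String) (replace_with : String) : Decidable (Pre_char_cleaner mystring ignore replace_with) := by unfold Pre_char_cleaner; infer_instance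

def pvWitness_char_cleaner : String × List String × String := ("ab", [], "x")

def Spec_char_cleaner (mystring : String) (ignore : List String) (replace_with : String) (out : String) : Prop := out = char_cleaner_alt mystring ignore replace_with
instance (mystring : String) (ignore : List String) (replace_with : String) (out : String) : Decidable (Spec_char_cleaner mystring ignore replace_with out) := by unfold Spec_char_cleaner; infer_instance

-- ===== CLAIM (what is proved, stated in full; the proofs are below) =====
def Claim_equal_char_cleaner : Prop := ∀ (mystring : String) (ignore : List String) (replace_with : String), Dom_char_cleaner mystring ignore replace_with → Pre_char_cleaner mystring ignore replace_with → Spec_char_cleaner mystring ignore replace_with (char_cleaner mystring ignore replace_with)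

-- ===== LEMMAS AND PROOFS =====

-- Python's s.replace(c, w) for a single character c is the character-wise substitution.
theorem pv_go_single (c : Char) (w : List Char) :
    ∀ (fuel : Nat) (l acc : List Char), l.length ≤ fuel →
      PySem.Chars.replace.go [c] w fuel l acc
        = acc.reverse ++ l.flatMap (fun x => if x = c then w else [x]) := by
  intro fuel
  induction fuel with
  | zero =>
    intro l acc h
    have : l = [] := List.length_eq_zero_iff.mp (Nat.le_zero.mp h)
    subst this
    simp [PySem.Chars.replace.go]
  | succ n ih =>
    intro l acc h
    cases l with
    | nil => simp [PySem.Chars.replace.go]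
    | cons x t =>
      simp only [PySem.Chars.replace.go, List.isPrefixOf_cons₂]
      by_cases hx : x = c
      · subst hx
        simp only [BEq.rfl, List.isPrefixOf_nil_left, Bool.and_self, if_pos]
        rw [ih _ _ (by simpa using Nat.le_of_succ_le_succ h)]
        simp
      · have : (c == x) = false := by simp [beq_eq_false_iff_ne, Ne.symm hx]
        simp only [this, Bool.false_and, Bool.false_eq_true, if_false]
        rw [ih _ _ (by simpa using Nat.le_of_succ_le_succ h)]
        simp [hx]

theorem pv_replace_single (s : List Char) (c : Char) (w : List Char) :
    PySem.Chars.replace s [c] w = s.flatMap (fun x => if x = c then w else [x]) := by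
  simp only [PySem.Chars.replace, List.isEmpty_cons, Bool.false_eq_true, if_false]
  simpa using pv_go_single c w s.length s [] le_rfl

-- every character of a replace result comes from the source or the inserted text
theorem pv_go_mem (old new : List Char) (x : Char) :
    ∀ (fuel : Nat) (l acc : List Char), x ∈ PySem.Chars.replace.go old new fuel l acc →
      x ∈ acc ∨ x ∈ l ∨ x ∈ new := by
  intro fuel
  induction fuel with
  | zero =>
    intro l acc h
    simp only [PySem.Chars.replace.go, List.mem_append, List.mem_reverse] at h
    tauto
  | succ n ih =>
    intro l acc h
    cases l with
    | nil =>
      left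
      simpa [PySem.Chars.replace.go] using h
    | cons c t =>
      simp only [PySem.Chars.replace.go] at h
      by_cases hp : old.isPrefixOf (c :: t) = true
      · rw [if_pos hp] at h
        rcases ih _ _ h with h1 | h1 | h1
        · simp only [List.mem_append, List.mem_reverse] at h1
          tauto
        · exact Or.inr (Or.inl (List.mem_of_mem_drop h1))
        · exact Or.inr (Or.inr h1)
      · rw [if_neg hp] at h
        rcases ih _ _ h with h1 | h1 | h1
        · rcases List.mem_cons.mp h1 with h2 | h2
          · exact Or.inr (Or.inl (by simp [h2]))
          · exact Or.inl h2
        · exact Or.inr (Or.inl (List.mem_cons_of_mem _ h1))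
        · exact Or.inr (Or.inr h1)

theorem pv_replace_mem (s old new : List Char) (x : Char)
    (h : x ∈ PySem.Chars.replace s old new) : x ∈ s ∨ x ∈ new := by
  unfold PySem.Chars.replace at h
  by_cases he : old.isEmpty = true
  · rw [if_pos he] at h
    simp only [List.mem_append, List.mem_flatMap, List.mem_cons] at h
    rcases h with h | ⟨c, hc, h⟩
    · exact Or.inr h
    · rcases h with h | h
      · exact Or.inl (h ▸ hc)
      · exact Or.inr h
  · rw [if_neg he] at h
    rcases pv_go_mem old new x s.length s [] h with h1 | h1 | h1
    · exact absurd h1 (List.not_mem_nil)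
    · exact Or.inl h1
    · exact Or.inr h1

theorem pv_strip_mem (l : List Char) (x : Char) (h : x ∈ PySem.Chars.strip l) : x ∈ l := by
  unfold PySem.Chars.strip PySem.Chars.rstrip PySem.Chars.lstrip at h
  rw [List.mem_reverse] at h
  have h2 := (List.dropWhile_sublist _).mem h
  rw [List.mem_reverse] at h2
  exact (List.dropWhile_sublist _).mem h2

-- every character surviving the strip and the four leading replaces comes from
-- mystring or from one of the inserted words
set_option maxRecDepth 2000 in
theorem pv_chain (m : String) :
    ∀ x ∈ (PySem.Str.replace (PySem.Str.replace (PySem.Str.replace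
      (PySem.Str.replace (PySem.Str.strip m) "%" "percent") "_+_" "+") "-->" "_to_")
      "->" "_to_").toList,
      x ∈ m.toList ∨ x ∈ ("percent+_to".toList) := by
  intro x hx
  simp only [PySem.Str.replace, PySem.Str.strip, String.toList_ofList] at hx
  have e4 : "percent+_to".toList = ['p','e','r','c','e','n','t','+','_','t','o'] := by rfl
  have big : ∀ (u : List Char),
      (u.all (fun y => (['p','e','r','c','e','n','t','+','_','t','o'] : List Char).contains y)) = true →
      ∀ y ∈ u, y ∈ ("percent+_to".toList) := by
    intro u hu y hy
    rw [e4]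
    have := List.all_eq_true.mp hu y hy
    simpa [List.contains_iff_mem] using this
  have hw : ∀ (w : List Char), w = "percent".toList ∨ w = "+".toList ∨ w = "_to_".toList →
      ∀ y ∈ w, y ∈ ("percent+_to".toList) := by
    rintro w (rfl | rfl | rfl)
    · exact big _ (by rfl)
    · exact big _ (by rfl)
    · exact big _ (by rfl)
  rcases pv_replace_mem _ _ _ _ hx with hx | hx
  · rcases pv_replace_mem _ _ _ _ hx with hx | hx
    · rcases pv_replace_mem _ _ _ _ hx with hx | hx
      · rcases pv_replace_mem _ _ _ _ hx with hx | hx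
        · exact Or.inl (pv_strip_mem _ _ hx)
        · exact Or.inr (hw _ (Or.inl rfl) x hx)
      · exact Or.inr (hw _ (Or.inr (Or.inl rfl)) x hx)
    · exact Or.inr (hw _ (Or.inr (Or.inr rfl)) x hx)
  · exact Or.inr (hw _ (Or.inr (Or.inr rfl)) x hx)

-- the scan condition, in propositional form over the chars actually in the string s
def pvScanP (ignore : List String) (w : List Char) (s : List Char) : List Char → Prop
  | [] => True
  | c :: cs =>
      ((c ∈ s ∧ String.ofList [c] ∉ ignore) → ∀ b ∈ cs, pvHarmC ignore w b = false)
        ∧ pvScanP ignore w s cs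

theorem pv_subst_mem (s w : List Char) (c x : Char)
    (h : x ∈ s.flatMap (fun y => if y = c then w else [y])) : x ∈ s ∨ x ∈ w := by
  rcases List.mem_flatMap.mp h with ⟨y, hy, hx⟩
  by_cases hyc : y = c
  · rw [if_pos hyc] at hx
    exact Or.inr hx
  · rw [if_neg hyc] at hx
    rcases List.mem_singleton.mp hx with rfl
    exact Or.inl hy

theorem pv_subst_id (s w : List Char) (c : Char) (h : c ∉ s) :
    s.flatMap (fun y => if y = c then w else [y]) = s := by
  rw [List.flatMap_congr (g := fun y => [y])]
  · simp
  · intro y hy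
    exact if_neg (fun hyc => h (by rw [← hyc]; exact hy))

-- substitution preserves the scan condition for the remaining characters
theorem pv_scan_subst (ignore : List String) (w : List Char) (c : Char) :
    ∀ (cs s : List Char), (c ∈ s → ∀ b ∈ cs, pvHarmC ignore w b = false) →
      pvScanP ignore w s cs →
      pvScanP ignore w (s.flatMap (fun y => if y = c then w else [y])) cs := by
  intro cs
  induction cs with
  | nil => intro s _ _; trivial
  | cons d ds ih =>
    intro s hc h
    obtain ⟨h1, h2⟩ := h
    refine ⟨?_, ih s (fun hcs b hb => hc hcs b (List.mem_cons_of_mem _ hb)) h2⟩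
    rintro ⟨hd, hdig⟩ b hb
    by_cases hcs : c ∈ s
    · rcases pv_subst_mem s w c d hd with hd' | hd'
      · exact h1 ⟨hd', hdig⟩ b hb
      · -- d came from the inserted text w
        exact hc hcs b (List.mem_cons_of_mem _ hb)
    · rw [pv_subst_id s w c hcs] at hd
      exact h1 ⟨hd, hdig⟩ b hb

-- MASTER: under the scan condition the sequential single-char replaces over cs
-- equal one pointwise substitution pass over the string.
theorem pv_master (ign : List String) (w : List Char) :
    ∀ (cs s : List Char), pvScanP ign w s cs →
      cs.foldl (fun a c => if String.ofList [c] ∉ ign then PySem.Chars.replace a [c] w else a) s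
        = s.flatMap (fun x => if x ∈ cs ∧ String.ofList [x] ∉ ign then w else [x]) := by
  intro cs
  induction cs with
  | nil =>
    intro s _
    simp
  | cons c cs ih =>
    intro s h
    obtain ⟨h1, h2⟩ := h
    simp only [List.foldl_cons]
    by_cases hc : String.ofList [c] ∉ ign
    · rw [if_pos hc, pv_replace_single,
          ih _ (pv_scan_subst ign w c cs s (fun hcs => h1 ⟨hcs, hc⟩) h2), List.flatMap_assoc]
      apply List.flatMap_congr
      intro x hxs
      by_cases hx : x = c
      · subst hx
        have hwfix : ∀ y ∈ w, (if y ∈ cs ∧ String.ofList [y] ∉ ign then w else [y]) = [y] := by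
          intro y hy
          by_cases hact : y ∈ cs ∧ String.ofList [y] ∉ ign
          · -- y is a non-ignored bad char of w still to come: the scan makes w = [y]
            have hharm := h1 ⟨hxs, hc⟩ y hact.1
            have hbe : (w == [y]) = true := by
              by_cases hbe : (w == [y]) = true
              · exact hbe
              · have hbe' : (w == [y]) = false := by simpa using hbe
                exfalso
                simp [pvHarmC, hbe'] at hharm
                exact hact.2 (hharm hy)
            have hw : w = [y] := by simpa using hbe
            rw [if_pos hact, hw]
          · exact if_neg hact
        rw [if_pos rfl,
            if_pos (⟨List.mem_cons_self, hc⟩ : x ∈ x :: cs ∧ String.ofList [x] ∉ ign)]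
        rw [List.flatMap_congr hwfix]
        simp
      · simp only [if_neg hx, List.flatMap_cons, List.flatMap_nil, List.append_nil]
        have hiff : (x ∈ cs ∧ String.ofList [x] ∉ ign) ↔ (x ∈ c :: cs ∧ String.ofList [x] ∉ ign) := by
          constructor
          · rintro ⟨ha, hb⟩; exact ⟨List.mem_cons_of_mem _ ha, hb⟩
          · rintro ⟨ha, hb⟩
            rcases List.mem_cons.mp ha with h' | h'
            · exact absurd h' hx
            · exact ⟨h', hb⟩
        by_cases hcond : x ∈ cs ∧ String.ofList [x] ∉ ign
        · rw [if_pos hcond, if_pos (hiff.mp hcond)]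
        · rw [if_neg hcond, if_neg (fun h' => hcond (hiff.mpr h'))]
    · rw [if_neg hc, ih _ h2]
      apply List.flatMap_congr
      intro x _
      by_cases hx : x = c
      · subst hx
        rw [if_neg (by simp at hc; simp [hc]), if_neg (by simp at hc; simp [hc])]
      · have hiff : (x ∈ cs ∧ String.ofList [x] ∉ ign) ↔ (x ∈ c :: cs ∧ String.ofList [x] ∉ ign) := by
          constructor
          · rintro ⟨ha, hb⟩; exact ⟨List.mem_cons_of_mem _ ha, hb⟩
          · rintro ⟨ha, hb⟩
            rcases List.mem_cons.mp ha with h' | h'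
            · exact absurd h' hx
            · exact ⟨h', hb⟩
        by_cases hcond : x ∈ cs ∧ String.ofList [x] ∉ ign
        · rw [if_pos hcond, if_pos (hiff.mp hcond)]
        · rw [if_neg hcond, if_neg (fun h' => hcond (hiff.mpr h'))]

-- the Boolean scan over mystring yields the propositional scan over any string
-- whose bad characters all come from mystring
theorem pv_scan_of_ok (m : String) (ignore : List String) (rw : String) :
    ∀ (cs : List Char), (∀ c ∈ cs, c ∈ pvBadCharsC) →
      pvScanOK m ignore rw cs = true →
      ∀ (s : List Char), (∀ x ∈ s, x ∈ pvBadCharsC → x ∈ m.toList) →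
      pvScanP ignore rw.toList s cs := by
  intro cs
  induction cs with
  | nil => intro _ _ s _; trivial
  | cons c cs ih =>
    intro hsub hok s hs
    simp only [pvScanOK, Bool.and_eq_true, Bool.not_eq_true',
      Bool.and_eq_false_iff] at hok
    obtain ⟨h1, h2⟩ := hok
    refine ⟨?_, ih (fun d hd => hsub d (List.mem_cons_of_mem _ hd)) h2 s hs⟩
    rintro ⟨hcs, hcig⟩ b hb
    have hcm : m.toList.contains c = true := by
      simpa [List.contains_iff_mem] using hs c hcs (hsub c List.mem_cons_self)
    have hcig' : (ignore.contains (String.ofList [c])) = false := by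
      simpa [List.contains_iff_mem] using hcig
    rcases h1 with h' | h'
    · rcases h' with h' | h'
      · rw [hcm] at h'; exact absurd h' (by simp)
      · rw [hcig'] at h'; exact absurd h' (by simp)
    · simpa using List.any_eq_false.mp h' b hb

-- lift a list-level fold to the String-level fold A performs
theorem pv_foldl_toList {α : Type} (f : String → α → String) (g : List Char → α → List Char)
    (h : ∀ s c, (f s c).toList = g s.toList c) :
    ∀ (l : List α) (s : String), (l.foldl f s).toList = l.foldl g s.toList := by
  intro l
  induction l with
  | nil => intro s; rfl
  | cons x t ih => intro s; simp only [List.foldl_cons, ih, h]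

theorem pv_badChars_map : pvBadChars = pvBadCharsC.map (fun c => String.ofList [c]) := by
  decide

-- ===== VERDICT (by name: the statement is the Claim_ definition above) =====
set_option maxRecDepth 2000 in
theorem char_cleaner_spec : Claim_equal_char_cleaner := by
  intro mystring ignore replace_with _ hpre
  unfold Spec_char_cleaner char_cleaner char_cleaner_alt
  apply congrArg (fun s => PySem.Str.replace s "_to_" "->")
  set s := PySem.Str.replace (PySem.Str.replace (PySem.Str.replace
    (PySem.Str.replace (PySem.Str.strip mystring) "%" "percent") "_+_" "+") "-->" "_to_") "->" "_to_"
    with hs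
  apply String.toList_inj.mp
  rw [PySem.List.foldl_pyRange_pyGetD pvBadChars ""
        (fun a c => if c ∉ ignore then PySem.Str.replace a c replace_with else a) s le_rfl]
  simp only [Int.toNat_zero, List.drop_zero]
  rw [pv_badChars_map, List.foldl_map]
  rw [pv_foldl_toList
        (f := fun a c => if String.ofList [c] ∉ ignore then PySem.Str.replace a (String.ofList [c]) replace_with else a)
        (g := fun a c => if String.ofList [c] ∉ ignore then PySem.Chars.replace a [c] replace_with.toList else a)
        (by intro a c; by_cases h : String.ofList [c] ∉ ignore <;> simp [h, PySem.Str.replace])]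
  rw [String.toList_ofList]
  have hok : pvScanOK mystring ignore replace_with pvBadCharsC = true := hpre
  have hsrc : ∀ x ∈ s.toList, x ∈ pvBadCharsC → x ∈ mystring.toList := by
    intro x hx hb
    rcases pv_chain mystring x (hs ▸ hx) with h1 | h1
    · exact h1
    · have e4 : "percent+_to".toList = ['p','e','r','c','e','n','t','+','_','t','o'] := by rfl
      have hall : ((['p','e','r','c','e','n','t','+','_','t','o'] : List Char).all
          (fun y => !pvBadCharsC.contains y)) = true := by rfl
      have hnot : x ∉ pvBadCharsC := by
        have := List.all_eq_true.mp hall x (e4 ▸ h1)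
        simpa [List.contains_iff_mem] using this
      exact absurd hb hnot
  rw [pv_master ignore replace_with.toList pvBadCharsC s.toList
        (pv_scan_of_ok mystring ignore replace_with pvBadCharsC (fun c hc => hc) hok s.toList hsrc)]
  apply List.flatMap_congr
  intro x _
  by_cases h : x ∈ pvBadCharsC ∧ String.ofList [x] ∉ ignore
  · rw [if_pos h, if_pos (List.mem_filter.mpr ⟨h.1, by simpa using h.2⟩)]
  · rw [if_neg h, if_neg (fun hm => h (by
      rcases List.mem_filter.mp hm with ⟨h1, h2⟩
      exact ⟨h1, by simpa using h2⟩))]
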